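-- pv_equiv track=rewrite | github.com/CuCl-2/FOCAL | utils/utils_builder.py | _split_reports
-- ===== SOURCE A (Python) =====
-- def _split_reports(reports):
--     """
--     Split each report string by comma into individual tags.
--     Returns:
--         all_tags  : flat list of tag strings (total K)
--         tag_counts: list of m_i (number of tags per report)
--     """
--     all_tags   = []
--     tag_counts = []
--     for report in reports:
--         tags = [t.strip() for t in report.split(',') if t.strip()]
--         if not tags:
--             tags = [report.strip() or 'normal sinus rhythm']
--         all_tags.extend(tags)
--         tag_counts.append(len(tags))
--     return all_tags, tag_counts
-- ===== SOURCE B (Python) =====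
-- def _trim(cs):
--     """Two-pointer trim of a list of characters; returns the trimmed sublist."""
--     a, b = 0, len(cs)
--     while a < b and cs[a].isspace():
--         a += 1
--     while b > a and cs[b - 1].isspace():
--         b -= 1
--     return cs[a:b]
--
--
-- def _tokens(cs):
--     """Scan a char list, cutting at each comma and two-pointer-trimming each piece."""
--     toks = []
--     while ',' in cs:
--         k = cs.index(',')
--         t = _trim(cs[:k])
--         if t:
--             toks.append(''.join(t))
--         cs = cs[k + 1:]
--     t = _trim(cs)
--     if t:
--         toks.append(''.join(t))
--     return toks
--
--
-- def _split_reports(reports):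
--     """
--     Split each report string by comma into individual tags.
--     Returns:
--         all_tags  : flat list of tag strings (total K)
--         tag_counts: list of m_i (number of tags per report)
--     """
--     all_tags = []
--     tag_counts = []
--     for report in reports:
--         toks = _tokens(list(report))
--         if not toks:
--             t = _trim(list(report))
--             toks = [''.join(t) if t else 'normal sinus rhythm']
--         all_tags += toks
--         tag_counts.append(len(toks))
--     return all_tags, tag_counts
-- ===== Notes on version B (the rewrite author's own statement) =====
-- stated objective: alternative
-- what changed: Replaces the split/strip library pipeline with a manual scanner: each report's char list is cut at the next comma via index(), each piece trimmed by a two-pointer loop, tokens appended directly to the flat output; no str.split or str.strip is called.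
import Mathlib
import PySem

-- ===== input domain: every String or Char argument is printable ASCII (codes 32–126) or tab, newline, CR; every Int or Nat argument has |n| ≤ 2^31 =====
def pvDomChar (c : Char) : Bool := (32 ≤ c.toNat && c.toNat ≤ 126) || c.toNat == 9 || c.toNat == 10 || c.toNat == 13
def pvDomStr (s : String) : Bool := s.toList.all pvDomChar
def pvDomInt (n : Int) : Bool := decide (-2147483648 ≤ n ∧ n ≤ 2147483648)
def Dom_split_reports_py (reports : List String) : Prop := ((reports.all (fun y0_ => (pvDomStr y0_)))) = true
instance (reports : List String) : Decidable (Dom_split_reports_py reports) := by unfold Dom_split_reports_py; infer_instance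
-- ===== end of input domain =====

-- B replaces A's split/strip library pipeline with a manual scanner: cut at each comma via
-- index(), trim each piece with a two-pointer loop, append tokens straight to the flat output.

-- ===== PORT A =====
-- [t.strip() for t in report.split(',') if t.strip()], one interleaved accumulator loop
def split_reports_py (reports : List String) : List String × List Int :=
  reports.foldl
    (fun acc report =>
      let tags := (((PySem.Str.split? report ",").getD []).filter
          (fun t => PySem.Str.strip t ≠ "")).map PySem.Str.strip
      let tags := if tags = [] then
          [if PySem.Str.strip report ≠ "" then PySem.Str.strip report else "normal sinus rhythm"]
        else tags
      (acc.1 ++ tags, acc.2 ++ [(tags.length : Int)]))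
    ([], [])

-- ===== PORT B =====
-- two-pointer trim, first loop: advance a past leading whitespace (while a < b and cs[a].isspace())
def pvTrimA (cs : List Char) (a b : Nat) : Nat :=
  if h : a < b ∧ PySem.Chars.isspace (cs.getD a ' ') = true then pvTrimA cs (a + 1) b else a
termination_by b - a
decreasing_by omega

-- second loop: retreat b past trailing whitespace (while b > a and cs[b-1].isspace())
def pvTrimB (cs : List Char) (a b : Nat) : Nat :=
  if h : a < b ∧ PySem.Chars.isspace (cs.getD (b - 1) ' ') = true then pvTrimB cs a (b - 1) else b
termination_by b
decreasing_by omega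

-- _trim(cs): cs[a:b] after the two pointer loops
def pvTrim (cs : List Char) : List Char :=
  let a := pvTrimA cs 0 cs.length
  let b := pvTrimB cs a cs.length
  (cs.drop a).take (b - a)

-- _tokens(cs): cut at the next comma (',' in cs / cs.index(',') = index?), trim, collect
def pvTokens (cs : List Char) : List String :=
  match h : PySem.List.index? cs ',' with
  | some k =>
      let t := pvTrim (cs.take k)
      let rest := pvTokens (cs.drop (k + 1))
      if t ≠ [] then String.ofList t :: rest else rest
  | none =>
      let t := pvTrim cs
      if t ≠ [] then [String.ofList t] else []
termination_by cs.length
decreasing_by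
  obtain ⟨hk, -⟩ := PySem.List.getElem_of_index?_eq_some h
  simp; omega

def split_reports_py_alt (reports : List String) : List String × List Int :=
  reports.foldl
    (fun acc report =>
      let toks := pvTokens report.toList
      let toks := if toks = [] then
          (let t := pvTrim report.toList
           [if t ≠ [] then String.ofList t else "normal sinus rhythm"])
        else toks
      (acc.1 ++ toks, acc.2 ++ [(toks.length : Int)]))
    ([], [])

-- ===== PRECONDITION & SPEC =====
def Spec_split_reports_py (reports : List String) (out : List String × List Int) : Prop := out = split_reports_py_alt reports
instance (reports : List String) (out : List String × List Int) : Decidable (Spec_split_reports_py reports out) := by unfold Spec_split_reports_py; infer_instance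

-- ===== CLAIM (what is proved, stated in full; the proofs are below) =====
def Claim_equal_split_reports_py : Prop := ∀ (reports : List String), Dom_split_reports_py reports → Spec_split_reports_py reports (split_reports_py reports)

-- ===== LEMMAS AND PROOFS =====

-- the first pointer loop computes the length of the leading-whitespace prefix
theorem pvTrimA_spec (cs : List Char) (a : Nat) :
    pvTrimA cs a cs.length = a + ((cs.drop a).takeWhile PySem.Chars.isspace).length := by
  induction a using pvTrimA.induct (cs := cs) (b := cs.length) with
  | case1 a h ih =>
    obtain ⟨hab, hws⟩ := h
    rw [pvTrimA, dif_pos ⟨hab, hws⟩, ih]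
    rw [List.drop_eq_getElem_cons hab, List.takeWhile_cons]
    rw [List.getD_eq_getElem cs ' ' hab] at hws
    simp [hws]; omega
  | case2 a h =>
    rw [pvTrimA, dif_neg h]
    rcases Nat.lt_or_ge a cs.length with hlt | hge
    · rw [List.drop_eq_getElem_cons hlt, List.takeWhile_cons]
      have hn : ¬ PySem.Chars.isspace cs[a] = true := by
        rw [← List.getD_eq_getElem cs ' ' hlt]; exact fun hw => h ⟨hlt, hw⟩
      simp [hn]
    · simp [List.drop_eq_nil_of_le hge]

-- the second pointer loop computes where the trailing whitespace of cs[a:b] starts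
theorem pvTrimB_spec (cs : List Char) (a : Nat) :
    ∀ b, a ≤ b → b ≤ cs.length →
    pvTrimB cs a b = a + (PySem.Chars.rstrip ((cs.drop a).take (b - a))).length := by
  intro b
  induction b using pvTrimB.induct (cs := cs) (a := a) with
  | case1 b h ih =>
    intro hab hb
    obtain ⟨hlt, hws⟩ := h
    rw [pvTrimB, dif_pos ⟨hlt, hws⟩, ih (by omega) (by omega)]
    have hn : b - 1 - a < (cs.drop a).length := by simp; omega
    have hseg : (cs.drop a).take (b - a) = (cs.drop a).take (b - 1 - a) ++ [(cs.drop a)[b - 1 - a]] := by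
      have : b - a = (b - 1 - a) + 1 := by omega
      rw [this, List.take_add_one, List.getElem?_eq_getElem hn]
      simp
    have hgw : PySem.Chars.isspace (cs[a + (b - 1 - a)]'(by omega)) = true := by
      have h1 : a + (b - 1 - a) = b - 1 := by omega
      rw [List.getD_eq_getElem cs ' ' (by omega)] at hws
      simp_rw [h1]
      exact hws
    rw [hseg]
    simp [PySem.Chars.rstrip, hgw]
  | case2 b h =>
    intro hab hb
    rw [pvTrimB, dif_neg h]
    rcases Nat.eq_or_lt_of_le hab with heq | hlt
    · subst heq; simp [PySem.Chars.rstrip]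
    · have hws : ¬ PySem.Chars.isspace (cs.getD (b - 1) ' ') = true := fun hw => h ⟨hlt, hw⟩
      have hn : b - 1 - a < (cs.drop a).length := by simp; omega
      have hseg : (cs.drop a).take (b - a) = (cs.drop a).take (b - 1 - a) ++ [(cs.drop a)[b - 1 - a]] := by
        have : b - a = (b - 1 - a) + 1 := by omega
        rw [this, List.take_add_one, List.getElem?_eq_getElem hn]
        simp
      have hgw : ¬ PySem.Chars.isspace (cs[a + (b - 1 - a)]'(by omega)) = true := by
        have h1 : a + (b - 1 - a) = b - 1 := by omega
        rw [List.getD_eq_getElem cs ' ' (by omega)] at hws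
        simp_rw [h1]
        exact hws
      rw [hseg]
      simp [PySem.Chars.rstrip, hgw]
      omega

theorem drop_takeWhile_length (cs : List Char) :
    cs.drop (cs.takeWhile PySem.Chars.isspace).length = cs.dropWhile PySem.Chars.isspace := by
  have h : cs.takeWhile PySem.Chars.isspace ++ cs.dropWhile PySem.Chars.isspace = cs :=
    List.takeWhile_append_dropWhile
  calc cs.drop (cs.takeWhile PySem.Chars.isspace).length
      = (cs.takeWhile PySem.Chars.isspace ++ cs.dropWhile PySem.Chars.isspace).drop
          (cs.takeWhile PySem.Chars.isspace).length := by rw [h]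
    _ = cs.dropWhile PySem.Chars.isspace := by rw [List.drop_left]

theorem rstrip_prefix (L : List Char) : PySem.Chars.rstrip L <+: L := by
  have h := List.dropWhile_suffix (l := L.reverse) PySem.Chars.isspace
  have h2 := List.reverse_prefix.mpr h
  simpa [PySem.Chars.rstrip] using h2

theorem pvTrim_eq_strip (cs : List Char) : pvTrim cs = PySem.Chars.strip cs := by
  unfold pvTrim
  have ha0 : pvTrimA cs 0 cs.length = (cs.takeWhile PySem.Chars.isspace).length := by
    simpa using pvTrimA_spec cs 0
  have haw : (cs.takeWhile PySem.Chars.isspace).length ≤ cs.length :=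
    (List.takeWhile_sublist _).length_le
  have hb0 := pvTrimB_spec cs ((cs.takeWhile PySem.Chars.isspace).length) cs.length haw le_rfl
  have hfull : (cs.drop (cs.takeWhile PySem.Chars.isspace).length).take
      (cs.length - (cs.takeWhile PySem.Chars.isspace).length) = cs.drop (cs.takeWhile PySem.Chars.isspace).length := by
    apply List.take_of_length_le; simp
  rw [hfull] at hb0
  show (cs.drop (pvTrimA cs 0 cs.length)).take
      (pvTrimB cs (pvTrimA cs 0 cs.length) cs.length - pvTrimA cs 0 cs.length) = _
  rw [ha0, hb0, Nat.add_sub_cancel_left,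
      (List.prefix_iff_eq_take.mp (rstrip_prefix _)).symm, drop_takeWhile_length]
  simp [PySem.Chars.strip, PySem.Chars.lstrip]

-- the comma splitter of A's pipeline, as the natural structural recursion
def pvConsume : List Char → List Char → List (List Char)
  | [], cur => [cur.reverse]
  | c :: rest, cur => if c = ',' then cur.reverse :: pvConsume rest [] else pvConsume rest (c :: cur)

theorem pvGo_spec (l : List Char) : ∀ (fuel : Nat) (cur : List Char) (acc : List (List Char)),
    l.length ≤ fuel →
    PySem.Chars.splitOn.go [','] fuel l cur acc = acc.reverse ++ pvConsume l cur := by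
  induction l with
  | nil =>
    intro fuel cur acc _
    cases fuel <;> simp [PySem.Chars.splitOn.go, pvConsume]
  | cons c rest ih =>
    intro fuel cur acc hf
    cases fuel with
    | zero => simp at hf
    | succ f =>
      rw [PySem.Chars.splitOn.go]
      by_cases hc : c = ','
      · subst hc
        have hp : [','].isPrefixOf (',' :: rest) = true := by simp [List.isPrefixOf]
        rw [if_pos hp]
        simp only [List.length_singleton, List.drop_succ_cons, List.drop_zero]
        rw [ih f [] (cur.reverse :: acc) (by simp at hf; omega)]
        simp [pvConsume]
      · have hp : ¬ [','].isPrefixOf (c :: rest) = true := by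
          simp [List.isPrefixOf]; exact fun h => hc h.symm
        rw [if_neg hp, ih f (c :: cur) acc (by simp at hf; omega)]
        simp [pvConsume, hc]

theorem splitOn_comma (cs : List Char) :
    PySem.Chars.splitOn cs [','] = pvConsume cs [] := by
  unfold PySem.Chars.splitOn
  rw [pvGo_spec cs (cs.length + 1) [] [] (by omega)]
  simp

theorem pvConsume_idx (cs : List Char) : ∀ cur : List Char,
    pvConsume cs cur =
      match PySem.List.index? cs ',' with
      | some k => (cur.reverse ++ cs.take k) :: pvConsume (cs.drop (k + 1)) []
      | none => [cur.reverse ++ cs] := by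
  induction cs with
  | nil => intro cur; simp [pvConsume, PySem.List.index?]
  | cons c rest ih =>
    intro cur
    by_cases hc : c = ','
    · subst hc
      rw [PySem.List.index?_cons_self]
      simp [pvConsume]
    · rw [PySem.List.index?_cons_of_ne rest (fun h => hc h)]
      rcases hidx : PySem.List.index? rest ',' with _ | k
      · simp only [pvConsume, if_neg hc, ih (c :: cur), hidx]
        simp
      · simp only [pvConsume, if_neg hc, ih (c :: cur), hidx]
        simp [Option.map]

-- unfolding equations of pvTokens, keyed by index?
theorem pvTokens_some {cs : List Char} {k : Nat} (h : PySem.List.index? cs ',' = some k) :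
    pvTokens cs =
      (if pvTrim (cs.take k) ≠ [] then
        String.ofList (pvTrim (cs.take k)) :: pvTokens (cs.drop (k + 1))
      else pvTokens (cs.drop (k + 1))) := by
  rw [pvTokens.eq_def]
  split
  · next k' heq => rw [heq] at h; injection h with h; subst h; rfl
  · next heq => rw [heq] at h; exact absurd h (by simp)

theorem pvTokens_none {cs : List Char} (h : PySem.List.index? cs ',' = none) :
    pvTokens cs = (if pvTrim cs ≠ [] then [String.ofList (pvTrim cs)] else []) := by
  rw [pvTokens.eq_def]
  split
  · next k' heq => rw [heq] at h; exact absurd h (by simp)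
  · next heq => rfl

-- _tokens computes exactly A's filtered-stripped token list
theorem pvTokens_eq (cs : List Char) :
    pvTokens cs =
      ((PySem.Chars.splitOn cs [',']).filter
          (fun t => PySem.Chars.strip t ≠ [])).map
        (fun t => String.ofList (PySem.Chars.strip t)) := by
  induction cs using pvTokens.induct with
  | case1 cs k h t ht ih =>
    rw [pvTokens_some h, splitOn_comma, pvConsume_idx cs []]
    rw [splitOn_comma] at ih
    simp only [h]
    have ht' : PySem.Chars.strip (List.take k cs) ≠ [] := by
      rw [← pvTrim_eq_strip]; exact ht
    simp [List.filter, pvTrim_eq_strip, ht', ih]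
  | case2 cs k h t ht ih =>
    rw [pvTokens_some h, splitOn_comma, pvConsume_idx cs []]
    rw [splitOn_comma] at ih
    simp only [h]
    have ht' : PySem.Chars.strip (List.take k cs) = [] := by
      rw [← pvTrim_eq_strip]; exact not_not.mp ht
    simp [List.filter, pvTrim_eq_strip, ht', ih]
  | case3 cs h t ht =>
    rw [pvTokens_none h, splitOn_comma, pvConsume_idx cs []]
    simp only [h]
    have ht' : PySem.Chars.strip cs ≠ [] := by
      rw [← pvTrim_eq_strip]; exact ht
    simp [List.filter, pvTrim_eq_strip, ht']
  | case4 cs h t ht =>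
    rw [pvTokens_none h, splitOn_comma, pvConsume_idx cs []]
    simp only [h]
    have ht' : PySem.Chars.strip cs = [] := by
      rw [← pvTrim_eq_strip]; exact not_not.mp ht
    simp [List.filter, pvTrim_eq_strip, ht']

-- filter/map juggling between the String level (A) and the char-list level (B)
theorem filterMap_level (L : List (List Char)) :
    ((L.map String.ofList).filter (fun s => PySem.Str.strip s ≠ "")).map PySem.Str.strip
      = (L.filter (fun t => PySem.Chars.strip t ≠ [])).map
          (fun t => String.ofList (PySem.Chars.strip t)) := by
  induction L with
  | nil => simp
  | cons t L ih =>
    have hs : PySem.Str.strip (String.ofList t) = String.ofList (PySem.Chars.strip t) := by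
      simp [PySem.Str.strip]
    by_cases hp : PySem.Chars.strip t ≠ []
    · simp [List.filter, hs, String.ofList_eq_empty_iff, hp]
      simpa using ih
    · rw [not_not] at hp
      simp [List.filter, hs, hp]
      simpa using ih

-- per-report: A's comprehension equals B's scanner
theorem tags_eq (report : String) :
    (((PySem.Str.split? report ",").getD []).filter
        (fun t => PySem.Str.strip t ≠ "")).map PySem.Str.strip
      = pvTokens report.toList := by
  have hsplit : PySem.Str.split? report "," =
      some ((PySem.Chars.splitOn report.toList [',']).map String.ofList) := by
    simp [PySem.Str.split?, PySem.Chars.split?]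
  rw [hsplit, pvTokens_eq]
  exact filterMap_level _

-- ===== VERDICT (by name: the statement is the Claim_ definition above) =====
theorem split_reports_py_spec : Claim_equal_split_reports_py := by
  intro reports _
  unfold Spec_split_reports_py split_reports_py split_reports_py_alt
  congr 1
  funext acc report
  simp only [tags_eq, pvTrim_eq_strip]
  have hs : PySem.Str.strip report = String.ofList (PySem.Chars.strip report.toList) := rfl
  by_cases h0 : pvTokens report.toList = []
  · by_cases hne : PySem.Chars.strip report.toList = []
    · simp [h0, hs, hne]
    · simp [h0, hs, hne, String.ofList_eq_empty_iff]
  · simp [h0]
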